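-- pv_equiv track=rewrite | github.com/aced2027/blackchart | backend/dukascopy_fast_parallel.py | build_month_list
-- ===== SOURCE A (Python) =====
-- def build_month_list(sy, sm, ey, em):
--     months = []
--     y, m = sy, sm
--     while (y, m) <= (ey, em):
--         months.append((y, m))
--         m += 1
--         if m > 12:
--             m = 1
--             y += 1
--     return months
-- ===== SOURCE B (Python) =====
-- def build_month_list(sy, sm, ey, em):
--     start = sy * 12 + (sm - 1)
--     end = ey * 12 + (em - 1)
--     return [(idx // 12, idx % 12 + 1) for idx in range(start, end + 1)]
-- ===== Notes on version B (the rewrite author's own statement) =====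
-- stated objective: alternative
-- what changed: Replaces the carry/branch while-loop over (year,month) pairs by closed-form divmod arithmetic: each month is a linear index in range(sy*12+sm-1, ey*12+em), mapped back with divmod by 12.
-- outside the precondition, e.g. on build_month_list(0, 13, 1, 1): A returns [(0, 13), (1, 1)], B returns [(1, 1)]; on build_month_list(0, 0, 0, 1): A returns [(0, 0), (0, 1)], B returns [(-1, 12), (0, 1)]
import Mathlib
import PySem

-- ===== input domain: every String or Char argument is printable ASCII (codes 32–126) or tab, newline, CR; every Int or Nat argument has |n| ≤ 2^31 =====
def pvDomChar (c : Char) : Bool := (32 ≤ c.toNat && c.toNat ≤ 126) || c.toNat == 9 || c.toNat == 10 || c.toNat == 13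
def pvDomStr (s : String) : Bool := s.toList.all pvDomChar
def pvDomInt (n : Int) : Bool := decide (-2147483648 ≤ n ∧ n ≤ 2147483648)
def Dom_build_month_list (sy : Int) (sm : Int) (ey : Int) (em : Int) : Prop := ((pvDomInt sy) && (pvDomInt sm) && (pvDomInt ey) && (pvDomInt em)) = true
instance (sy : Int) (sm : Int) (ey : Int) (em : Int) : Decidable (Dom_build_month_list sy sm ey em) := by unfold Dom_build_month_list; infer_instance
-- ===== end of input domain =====

-- B replaces A's carry/branch while-loop by a map of divmod arithmetic over a flat range (alternative decomposition, same cost).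


-- ===== PORT A =====
-- the while-loop of A: guard is Python's lexicographic (y, m) <= (ey, em)
def buildLoopA (ey em y m : Int) (months : List (Int × Int)) : List (Int × Int) :=
  if y < ey ∨ (y = ey ∧ m ≤ em) then
    let months' := months ++ [(y, m)]
    if m + 1 > 12 then buildLoopA ey em (y + 1) 1 months'
    else buildLoopA ey em y (m + 1) months'
  else months
termination_by ((ey + 2 - y).toNat * 8589934592 + (14 - m).toNat)
decreasing_by all_goals omega

def build_month_list (sy : Int) (sm : Int) (ey : Int) (em : Int) : List (Int × Int) :=
  buildLoopA ey em sy sm []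

-- ===== PORT B =====
def build_month_list_alt (sy : Int) (sm : Int) (ey : Int) (em : Int) : List (Int × Int) :=
  let start := sy * 12 + (sm - 1)
  let stop := ey * 12 + (em - 1)
  (PySem.List.pyRange start (stop + 1) 1).map
    (fun idx => (PySem.Int.floordiv idx 12, PySem.Int.mod idx 12 + 1))

-- ===== PRECONDITION & SPEC =====
-- Pre_ excludes inputs whose month arguments lie outside 1..12 and whose date range is non-empty:
-- there A returns lists containing non-calendar tuples such as (sy, 13), an artefact of its carry
-- loop, which B normalizes away; inputs where both readings give the empty range stay inside Pre_.
def Pre_build_month_list (sy : Int) (sm : Int) (ey : Int) (em : Int) : Prop :=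
  (1 ≤ sm ∧ sm ≤ 12 ∧ 1 ≤ em ∧ em ≤ 12) ∨
  ((ey < sy ∨ (ey = sy ∧ em < sm)) ∧ ey * 12 + em < sy * 12 + sm)
instance (sy : Int) (sm : Int) (ey : Int) (em : Int) : Decidable (Pre_build_month_list sy sm ey em) := by unfold Pre_build_month_list; infer_instance
def pvWitness_build_month_list : Int × Int × Int × Int := (2020, 11, 2021, 2)

def Spec_build_month_list (sy : Int) (sm : Int) (ey : Int) (em : Int) (out : List (Int × Int)) : Prop := out = build_month_list_alt sy sm ey em
instance (sy : Int) (sm : Int) (ey : Int) (em : Int) (out : List (Int × Int)) : Decidable (Spec_build_month_list sy sm ey em out) := by unfold Spec_build_month_list; infer_instance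

-- ===== CLAIM (what is proved, stated in full; the proofs are below) =====
def Claim_equal_build_month_list : Prop := ∀ (sy : Int) (sm : Int) (ey : Int) (em : Int), Dom_build_month_list sy sm ey em → Pre_build_month_list sy sm ey em → Spec_build_month_list sy sm ey em (build_month_list sy sm ey em)

-- ===== LEMMAS AND PROOFS =====

theorem divmod_month (y m : Int) (hm : 1 ≤ m) (hm' : m ≤ 12) :
    (PySem.Int.floordiv (y * 12 + (m - 1)) 12, PySem.Int.mod (y * 12 + (m - 1)) 12 + 1) = (y, m) := by
  have h1 : PySem.Int.floordiv (y * 12 + (m - 1)) 12 = y := by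
    rw [PySem.Int.floordiv_eq_iff_of_pos (by omega : (0:Int) < 12)]; omega
  have h2 := PySem.Int.floordiv_mul_add_mod (y * 12 + (m - 1)) 12
  rw [h1] at h2
  simp; omega

-- loop invariant: with normalized months, the loop appends exactly the flat index range
theorem buildLoopA_eq (ey em : Int) (he : 1 ≤ em) (he' : em ≤ 12) :
    ∀ (y m : Int) (acc : List (Int × Int)), 1 ≤ m → m ≤ 12 →
    buildLoopA ey em y m acc =
      acc ++ (PySem.List.pyRange (y * 12 + (m - 1)) (ey * 12 + (em - 1) + 1) 1).map
        (fun idx => (PySem.Int.floordiv idx 12, PySem.Int.mod idx 12 + 1)) := by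
  intro y m acc
  induction y, m, acc using buildLoopA.induct ey em with
  | case1 y m acc hg months' hwrap ih =>
    intro h1 h2
    -- m + 1 > 12, so m = 12: wrap to (y+1, 1)
    have hylt : y ≤ ey := by rcases hg with h | ⟨h, _⟩ <;> omega
    have hlt : y * 12 + (m - 1) < ey * 12 + (em - 1) + 1 := by
      rcases hg with h | ⟨h, h'⟩ <;> nlinarith
    rw [buildLoopA, if_pos hg, if_pos hwrap]
    rw [PySem.List.pyRange_one_cons hlt, List.map_cons, divmod_month y m h1 h2]
    have := ih (by omega) (by omega)
    rw [this]
    have harg : (y + 1) * 12 + (1 - 1) = y * 12 + (m - 1) + 1 := by omega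
    rw [harg]
    simp [months']
  | case2 y m acc hg months' hwrap ih =>
    intro h1 h2
    have hlt : y * 12 + (m - 1) < ey * 12 + (em - 1) + 1 := by
      rcases hg with h | ⟨h, h'⟩ <;> nlinarith
    rw [buildLoopA, if_pos hg, if_neg hwrap]
    rw [PySem.List.pyRange_one_cons hlt, List.map_cons, divmod_month y m h1 h2]
    have := ih (by omega) (by omega)
    rw [this]
    have harg : y * 12 + (m + 1 - 1) = y * 12 + (m - 1) + 1 := by omega
    rw [harg]
    simp [months']
  | case3 y m acc hg =>
    intro h1 h2
    -- guard false: range is empty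
    push Not at hg
    have hge : ey * 12 + (em - 1) + 1 ≤ y * 12 + (m - 1) := by
      rcases eq_or_lt_of_le hg.1 with h | h
      · have := hg.2 h.symm; omega
      · nlinarith
    rw [buildLoopA, if_neg (by push Not; exact hg)]
    rw [PySem.List.pyRange_one_eq_nil hge]
    simp

-- ===== VERDICT (by name: the statement is the Claim_ definition above) =====
theorem build_month_list_spec : Claim_equal_build_month_list := by
  intro sy sm ey em _ hpre
  show build_month_list sy sm ey em = build_month_list_alt sy sm ey em
  rcases hpre with ⟨h1, h2, h3, h4⟩ | ⟨hlex, hidx⟩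
  · rw [build_month_list, build_month_list_alt,
      buildLoopA_eq ey em h3 h4 sy sm [] h1 h2]
    simp
  · -- both readings of the range are empty
    rw [build_month_list, buildLoopA, if_neg (by omega), build_month_list_alt]
    rw [PySem.List.pyRange_one_eq_nil (by omega)]
    simp
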